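-- pv_equiv track=rewrite | github.com/HugoVizcainoSantana/LearningPython | src/Week2_Class1.py | max_and_min
-- ===== SOURCE A (Python) =====
-- def max_and_min(list):
--     """
--     Returns max and min value from a list
--     :param list: List[int]
--     :return: (int,int) max and min
--     """
--     min_elem, max_elem = list[0], list[0]
--     for e in list:
--         if e > max_elem:
--             max_elem = e
--         if e < min_elem:
--             min_elem = e
--     return max_elem, min_elem
-- ===== SOURCE B (Python) =====
-- def max_and_min(list):
--     """
--     Returns max and min value from a list
--     :param list: List[int]
--     :return: (int,int) max and min
--     """
--     s = sorted(list)
--     return s[-1], s[0]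
-- ===== Notes on version B (the rewrite author's own statement) =====
-- stated objective: alternative
-- what changed: B sorts the list and reads the max from the last and the min from the first element of the sorted copy, instead of A's single pass tracking running extremes.
import Mathlib
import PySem

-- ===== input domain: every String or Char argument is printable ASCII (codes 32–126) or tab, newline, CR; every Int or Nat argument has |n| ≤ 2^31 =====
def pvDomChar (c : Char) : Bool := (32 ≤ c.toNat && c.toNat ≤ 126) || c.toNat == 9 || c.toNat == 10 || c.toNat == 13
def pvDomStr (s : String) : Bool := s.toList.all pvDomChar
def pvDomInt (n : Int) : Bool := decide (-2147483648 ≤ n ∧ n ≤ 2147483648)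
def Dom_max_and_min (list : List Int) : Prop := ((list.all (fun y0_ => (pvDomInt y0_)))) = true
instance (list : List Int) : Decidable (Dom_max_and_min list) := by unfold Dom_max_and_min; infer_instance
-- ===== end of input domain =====

-- B sorts the list and reads the extremes off the ends of the sorted copy, instead of A's
-- single pass tracking running max/min (alternative decomposition, not claimed faster).

-- ===== PORT A =====
-- literal port of A: seed min/max with list[0], then scan the whole list updating both
def max_and_min (list : List Int) : Int × Int :=
  match PySem.List.pyGet? list 0 with
  | none => (0, 0)  -- IndexError in Python; excluded by Pre_
  | some h =>
    let st := list.foldl (fun (p : Int × Int) e =>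
        let max_elem := if e > p.2 then e else p.2
        let min_elem := if e < p.1 then e else p.1
        (min_elem, max_elem)) (h, h)
    (st.2, st.1)

-- ===== PORT B =====
-- literal port of B: s = sorted(list); return s[-1], s[0]
def max_and_min_alt (list : List Int) : Int × Int :=
  let s := PySem.List.sorted list (fun x => x) false
  ((PySem.List.pyGet? s (-1)).getD 0, (PySem.List.pyGet? s 0).getD 0)

-- ===== PRECONDITION & SPEC =====
-- Pre_ excludes only the empty list, on which A raises IndexError reading the first element (B raises too).
def Pre_max_and_min (list : List Int) : Prop := list ≠ []
instance (list : List Int) : Decidable (Pre_max_and_min list) := by unfold Pre_max_and_min; infer_instance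
def pvWitness_max_and_min : List Int := ([3, -1, 7, 7, 0])
def Spec_max_and_min (list : List Int) (out : Int × Int) : Prop := out = max_and_min_alt list
instance (list : List Int) (out : Int × Int) : Decidable (Spec_max_and_min list out) := by unfold Spec_max_and_min; infer_instance

-- ===== CLAIM (what is proved, stated in full; the proofs are below) =====
def Claim_equal_max_and_min : Prop := ∀ (list : List Int), Dom_max_and_min list → Pre_max_and_min list → Spec_max_and_min list (max_and_min list)

-- ===== LEMMAS AND PROOFS =====

-- A's fold is a pair of independent folds
theorem foldl_prod_minmax (l : List Int) (a b : Int) :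
    l.foldl (fun (p : Int × Int) e =>
        let max_elem := if e > p.2 then e else p.2
        let min_elem := if e < p.1 then e else p.1
        (min_elem, max_elem)) (a, b)
      = (l.foldl (fun m e => if e < m then e else m) a,
         l.foldl (fun m e => if e > m then e else m) b) := by
  induction l generalizing a b with
  | nil => rfl
  | cons x xs ih => simp [List.foldl, ih]

theorem foldl_max_spec (l : List Int) (a : Int) :
    (l.foldl (fun m e => if e > m then e else m) a = a
      ∨ l.foldl (fun m e => if e > m then e else m) a ∈ l)
    ∧ a ≤ l.foldl (fun m e => if e > m then e else m) a
    ∧ ∀ x ∈ l, x ≤ l.foldl (fun m e => if e > m then e else m) a := by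
  induction l generalizing a with
  | nil => simp
  | cons y ys ih =>
    simp only [List.foldl]
    set b := if y > a then y else a with hb
    have hab : a ≤ b ∧ y ≤ b ∧ (b = a ∨ b = y) := by rw [hb]; split <;> simp <;> omega
    obtain ⟨h1, h2, h3⟩ := ih b
    refine ⟨?_, by omega, ?_⟩
    · rcases h1 with h | h
      · rcases hab.2.2 with hba | hby
        · left; omega
        · right; exact List.mem_cons.mpr (Or.inl (by omega))
      · right; exact List.mem_cons_of_mem _ h
    · intro x hx
      rcases List.mem_cons.mp hx with rfl | hx
      · omega
      · exact h3 _ hx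

theorem foldl_min_spec (l : List Int) (a : Int) :
    (l.foldl (fun m e => if e < m then e else m) a = a
      ∨ l.foldl (fun m e => if e < m then e else m) a ∈ l)
    ∧ l.foldl (fun m e => if e < m then e else m) a ≤ a
    ∧ ∀ x ∈ l, l.foldl (fun m e => if e < m then e else m) a ≤ x := by
  induction l generalizing a with
  | nil => simp
  | cons y ys ih =>
    simp only [List.foldl]
    set b := if y < a then y else a with hb
    have hab : b ≤ a ∧ b ≤ y ∧ (b = a ∨ b = y) := by rw [hb]; split <;> simp <;> omega
    obtain ⟨h1, h2, h3⟩ := ih b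
    refine ⟨?_, by omega, ?_⟩
    · rcases h1 with h | h
      · rcases hab.2.2 with hba | hby
        · left; omega
        · right; exact List.mem_cons.mpr (Or.inl (by omega))
      · right; exact List.mem_cons_of_mem _ h
    · intro x hx
      rcases List.mem_cons.mp hx with rfl | hx
      · omega
      · exact h3 _ hx

theorem pairwise_le_getLast : (l : List Int) → (h : l ≠ []) → l.Pairwise (· ≤ ·) →
    ∀ x ∈ l, x ≤ l.getLast h
  | [y], _, _, x, hx => by
      simp only [List.mem_singleton] at hx; simp [hx, List.getLast]
  | y :: z :: zs, _, hp, x, hx => by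
      rw [List.getLast_cons (by simp)]
      rcases List.mem_cons.mp hx with rfl | hx'
      · exact (List.pairwise_cons.mp hp).1 _ (List.getLast_mem _)
      · exact pairwise_le_getLast (z :: zs) (by simp) (List.pairwise_cons.mp hp).2 x hx'

theorem pairwise_head_le (y : Int) (ys : List Int) (hp : (y :: ys).Pairwise (· ≤ ·)) :
    ∀ x ∈ y :: ys, y ≤ x := by
  intro x hx
  rcases List.mem_cons.mp hx with rfl | hx'
  · exact le_refl _
  · exact (List.pairwise_cons.mp hp).1 _ hx'

theorem max_and_min_spec' (list : List Int) (hne : list ≠ []) :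
    max_and_min list = max_and_min_alt list := by
  obtain ⟨h, t, rfl⟩ := List.exists_cons_of_ne_nil hne
  have hsp : (PySem.List.sorted (h :: t) (fun x => x) false).Perm (h :: t) :=
    PySem.List.sorted_perm _ _ _
  have hpw : (PySem.List.sorted (h :: t) (fun x => x) false).Pairwise (fun a b => a ≤ b) :=
    PySem.List.sorted_pairwise _ _
  set s := PySem.List.sorted (h :: t) (fun x => x) false with hs
  have hsne : s ≠ [] := by
    intro hnil; have := hsp.length_eq; rw [hnil] at this; simp at this
  have hmem : ∀ x, x ∈ s ↔ x ∈ h :: t := fun x => hsp.mem_iff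
  rw [max_and_min, max_and_min_alt]
  simp only [PySem.List.pyGet?_zero_cons, foldl_prod_minmax]
  rw [← hs, PySem.List.pyGet?_neg_one, List.getLast?_eq_some_getLast hsne]
  obtain ⟨hM1, hM2, hM3⟩ := foldl_max_spec (h :: t) h
  obtain ⟨hm1, hm2, hm3⟩ := foldl_min_spec (h :: t) h
  set M := (h :: t).foldl (fun m e => if e > m then e else m) h with hMdef
  set m := (h :: t).foldl (fun m e => if e < m then e else m) h with hmdef
  have hMmem : M ∈ h :: t := by rcases hM1 with h' | h' <;> simp [h', List.mem_cons]
  have hmmem : m ∈ h :: t := by rcases hm1 with h' | h' <;> simp [h', List.mem_cons]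
  have hlast_mem : s.getLast hsne ∈ h :: t := (hmem _).mp (List.getLast_mem _)
  have hM : M = s.getLast hsne :=
    le_antisymm (pairwise_le_getLast s hsne hpw M ((hmem M).mpr hMmem)) (hM3 _ hlast_mem)
  obtain ⟨sh, st', hsc⟩ := List.exists_cons_of_ne_nil hsne
  have hhead_mem : sh ∈ h :: t := (hmem sh).mp (by rw [hsc]; simp)
  have hm : m = sh := by
    refine le_antisymm (hm3 _ hhead_mem) ?_
    have := pairwise_head_le sh st' (by rw [← hsc]; exact hpw) m
    exact this (by rw [← hsc]; exact (hmem m).mpr hmmem)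
  simp only [Option.getD_some, Prod.mk.injEq]
  exact ⟨hM, by rw [hm, hsc]; simp⟩

-- ===== VERDICT (by name: the statement is the Claim_ definition above) =====
theorem max_and_min_spec : Claim_equal_max_and_min := by
  intro list _ hpre
  exact max_and_min_spec' list hpre
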